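-- pv_equiv track=rewrite | github.com/P-project-G/Algorithm | Python/2022_알고리즘/pgm_파괴되지않은건물.py | solution
-- ===== SOURCE A (Python) =====
-- def solution(board, skill):
--     answer = 0
--
--     skBuild = [[0] * (len(board[0]) + 1) for _ in range(len(board) + 1)]
--     for s in skill:
--         skBuild[s[1]][s[2]] += -s[5] if s[0] == 1 else s[5]
--         skBuild[s[1]][s[4] + 1] += s[5] if s[0] == 1 else -s[5]
--         skBuild[s[3] + 1][s[4] + 1] += -s[5] if s[0] == 1 else s[5]
--         skBuild[s[3] + 1][s[2]] += s[5] if s[0] == 1 else -s[5]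
--
--     for r in range(len(skBuild) - 1):
--         for c in range(len(skBuild[0]) - 1):
--             skBuild[r][c + 1] += skBuild[r][c]
--
--     for c in range(len(skBuild[0]) - 1):
--         for r in range(len(skBuild) - 1):
--             skBuild[r + 1][c] += skBuild[r][c]
--
--     for i in range(len(board)):
--         for j in range(len(board[0])):
--             board[i][j] += skBuild[i][j]
--             if board[i][j] > 0:
--                 answer += 1
--
--     return answer
-- ===== SOURCE B (Python) =====
-- def solution(board, skill):
--     # Apply each skill directly to every cell of its rectangle, then count
--     # positive cells of the rows x cols grid in one final pass.
--     rows, cols = len(board), len(board[0])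
--     for s in skill:
--         delta = -s[5] if s[0] == 1 else s[5]
--         for r in range(s[1], s[3] + 1):
--             for c in range(s[2], s[4] + 1):
--                 board[r][c] += delta
--     return sum(1 for r in range(rows) for c in range(cols) if board[r][c] > 0)
-- ===== Notes on version B (the rewrite author's own statement) =====
-- stated objective: simpler
-- what changed: B drops A's 2D difference array and double prefix-sum passes entirely: it adds each skill's delta directly to every cell of its rectangle and then counts positive cells in one final pass.
-- outside the precondition, e.g. on solution([[1, 1], [1, 1]], [[1, -1, 0, 0, 0, 3]]): A returns 4, B returns 2; on solution([[1], [1], [1]], [[2, 2, 0, 0, 0, 3]]): A returns 2, B returns 3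
import Mathlib
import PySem

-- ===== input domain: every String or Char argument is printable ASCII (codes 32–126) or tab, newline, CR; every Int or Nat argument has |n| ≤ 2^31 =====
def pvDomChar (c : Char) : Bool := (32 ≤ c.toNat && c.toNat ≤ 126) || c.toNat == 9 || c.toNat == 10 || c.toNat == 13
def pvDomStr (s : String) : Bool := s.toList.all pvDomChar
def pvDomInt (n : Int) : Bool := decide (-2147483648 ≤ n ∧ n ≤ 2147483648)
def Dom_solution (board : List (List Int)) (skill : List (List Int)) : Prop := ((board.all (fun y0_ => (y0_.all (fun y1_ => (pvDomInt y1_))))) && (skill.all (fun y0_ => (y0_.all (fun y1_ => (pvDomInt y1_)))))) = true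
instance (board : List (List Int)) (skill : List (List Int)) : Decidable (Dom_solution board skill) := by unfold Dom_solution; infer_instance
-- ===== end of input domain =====

-- B drops A's 2D difference array + double prefix sums and instead adds each skill's delta
-- directly to every cell of its rectangle, then counts positive cells in one pass (simpler; not faster).
-- Both Pythons mutate `board` in place; the equivalence proved here is about the return value only.

-- ===== PORT A =====
-- skBuild[r][c] += v  (indices are in range and nonnegative on Pre_, so Nat indexing via toNat is exact there)
def pvAddAt (g : List (List Int)) (r c : Nat) (v : Int) : List (List Int) :=
  g.modify r (fun row => row.modify c (fun x => x + v))

def solution (board : List (List Int)) (skill : List (List Int)) : Int :=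
  let n := board.length
  let m := (board.getD 0 []).length
  -- skBuild = [[0]*(m+1) for _ in range(n+1)]
  let sk0 : List (List Int) := List.replicate (n+1) (List.replicate (m+1) (0:Int))
  -- for s in skill: the four corner updates
  let sk1 := skill.foldl (fun g s =>
    let d := s.getD 5 0
    let g := pvAddAt g (s.getD 1 0).toNat (s.getD 2 0).toNat (if s.getD 0 0 = 1 then -d else d)
    let g := pvAddAt g (s.getD 1 0).toNat ((s.getD 4 0).toNat + 1) (if s.getD 0 0 = 1 then d else -d)
    let g := pvAddAt g ((s.getD 3 0).toNat + 1) ((s.getD 4 0).toNat + 1) (if s.getD 0 0 = 1 then -d else d)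
    pvAddAt g ((s.getD 3 0).toNat + 1) (s.getD 2 0).toNat (if s.getD 0 0 = 1 then d else -d)) sk0
  -- row prefix pass: len(skBuild)-1 = n, len(skBuild[0])-1 = m
  let sk2 := (List.range n).foldl (fun g r =>
      (List.range m).foldl (fun g c =>
        g.modify r (fun row => row.modify (c+1) (fun x => x + row.getD c 0))) g) sk1
  -- column prefix pass
  let sk3 := (List.range m).foldl (fun g c =>
      (List.range n).foldl (fun g r =>
        g.modify (r+1) (fun row => row.modify c (fun x => x + (g.getD r []).getD c 0))) g) sk2
  -- final pass: board[i][j] += skBuild[i][j]; count > 0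
  (List.range n).foldl (fun acc i =>
      (List.range m).foldl (fun acc j =>
        if (board.getD i []).getD j 0 + (sk3.getD i []).getD j 0 > 0 then acc + 1 else acc) acc) 0

-- ===== PORT B =====
def solution_alt (board : List (List Int)) (skill : List (List Int)) : Int :=
  let rows := board.length
  let cols := (board.getD 0 []).length
  -- for each skill, add delta to every cell of its (inclusive) rectangle
  -- (indices are nonnegative on Pre_, so toNat is exact there)
  let board' := skill.foldl (fun b s =>
    let delta := if s.getD 0 0 = 1 then -(s.getD 5 0) else s.getD 5 0
    (PySem.List.pyRange (s.getD 1 0) (s.getD 3 0 + 1) 1).foldl (fun b r =>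
      (PySem.List.pyRange (s.getD 2 0) (s.getD 4 0 + 1) 1).foldl (fun b c =>
        b.modify r.toNat (fun row => row.modify c.toNat (fun x => x + delta))) b) b) board
  -- sum(1 for r in range(rows) for c in range(cols) if board[r][c] > 0)
  (((List.range rows).flatMap (fun r => (List.range cols).map
      (fun c => (board'.getD r []).getD c 0))).countP (fun v => decide (0 < v)) : Int)

-- ===== PRECONDITION & SPEC =====
-- Pre_ asks for a nonempty board whose rows all reach the declared width len(board[0]), and for
-- skills that are well-formed in-range rectangles ([type, r1, c1, r2, c2, degree] with
-- 0 ≤ r1 ≤ r2 < rows, 0 ≤ c1 ≤ c2 < cols) — the problem's contract; outside it A raises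
-- IndexError or returns accidental values via Python's negative-index wraparound / inverted
-- rectangles, neither of which either implementation specifies.
def Pre_solution (board : List (List Int)) (skill : List (List Int)) : Prop :=
  board ≠ [] ∧
  (∀ row ∈ board, (board.getD 0 []).length ≤ row.length) ∧
  (∀ s ∈ skill, 6 ≤ s.length ∧
    0 ≤ s.getD 1 0 ∧ s.getD 1 0 ≤ s.getD 3 0 ∧ s.getD 3 0 < (board.length : Int) ∧
    0 ≤ s.getD 2 0 ∧ s.getD 2 0 ≤ s.getD 4 0 ∧ s.getD 4 0 < ((board.getD 0 []).length : Int))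
instance (board : List (List Int)) (skill : List (List Int)) : Decidable (Pre_solution board skill) := by
  unfold Pre_solution; infer_instance

def pvWitness_solution : List (List Int) × List (List Int) :=
  ([[5, 5, 5, 5], [5, 5, 5, 5], [5, 5, 5, 5]],
   [[1, 0, 0, 1, 2, 4], [1, 2, 0, 2, 3, 2], [2, 1, 0, 2, 1, 2]])

def Spec_solution (board : List (List Int)) (skill : List (List Int)) (out : Int) : Prop := out = solution_alt board skill
instance (board : List (List Int)) (skill : List (List Int)) (out : Int) : Decidable (Spec_solution board skill out) := by unfold Spec_solution; infer_instance

-- ===== CLAIM (what is proved, stated in full; the proofs are below) =====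
def Claim_equal_solution : Prop := ∀ (board : List (List Int)) (skill : List (List Int)), Dom_solution board skill → Pre_solution board skill → Spec_solution board skill (solution board skill)

-- ===== LEMMAS AND PROOFS =====

-- cell access with Python's 0-defaulting out of range never used in range
def pvGet2 (g : List (List Int)) (i j : Nat) : Int := (g.getD i []).getD j 0

-- matrix shape: R rows, each of length C
def pvShape (g : List (List Int)) (R C : Nat) : Prop :=
  g.length = R ∧ ∀ i < R, (g.getD i []).length = C

-- board shape on Pre_: R rows, each of length ≥ C (ragged tails beyond the declared width allowed)
def pvShapeGe (g : List (List Int)) (R C : Nat) : Prop :=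
  g.length = R ∧ ∀ i < R, C ≤ (g.getD i []).length

def pvDelta (s : List Int) : Int := if s.getD 0 0 = 1 then -(s.getD 5 0) else s.getD 5 0
def pvR1 (s : List Int) : Nat := (s.getD 1 0).toNat
def pvC1 (s : List Int) : Nat := (s.getD 2 0).toNat
def pvR2 (s : List Int) : Nat := (s.getD 3 0).toNat
def pvC2 (s : List Int) : Nat := (s.getD 4 0).toNat

-- the ±1 row / column masks of the four difference-array corner updates
def pvRmask (s : List Int) (i : Nat) : Int :=
  (if pvR1 s = i then 1 else 0) - (if pvR2 s + 1 = i then 1 else 0)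
def pvCmask (s : List Int) (j : Nat) : Int :=
  (if pvC1 s = j then 1 else 0) - (if pvC2 s + 1 = j then 1 else 0)

-- target cell value: original + sum of deltas of covering skills
def pvCellAdd (skill : List (List Int)) (i j : Nat) : Int :=
  (skill.map (fun s => if pvR1 s ≤ i ∧ i ≤ pvR2 s ∧ pvC1 s ≤ j ∧ j ≤ pvC2 s then pvDelta s else 0)).sum

theorem pvGetD_modify {α : Type} (l : List α) (i j : Nat) (f : α → α) (d : α) :
    (l.modify i f).getD j d = if i = j ∧ j < l.length then f (l.getD j d) else l.getD j d := by
  rw [List.getD_eq_getElem?_getD, List.getD_eq_getElem?_getD, List.getElem?_modify]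
  by_cases hj : j < l.length
  · rw [List.getElem?_eq_getElem hj]
    by_cases hij : i = j <;> simp [hij, hj]
  · rw [List.getElem?_eq_none (by omega)]
    simp [hj]

theorem pvShape_addAt {g : List (List Int)} {R C : Nat} (h : pvShape g R C)
    (r c : Nat) (v : Int) : pvShape (pvAddAt g r c v) R C := by
  obtain ⟨h1, h2⟩ := h
  refine ⟨by simp [pvAddAt, h1], fun i hi => ?_⟩
  rw [pvAddAt, pvGetD_modify]
  split_ifs with h3
  · rw [List.length_modify]; exact h2 i hi
  · exact h2 i hi

theorem pvGet2_addAt {g : List (List Int)} {R C : Nat} (h : pvShape g R C)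
    (r c : Nat) (hr : r < R) (hc : c < C) (v : Int) (i j : Nat) :
    pvGet2 (pvAddAt g r c v) i j = pvGet2 g i j + if r = i ∧ c = j then v else 0 := by
  obtain ⟨h1, h2⟩ := h
  rw [pvGet2, pvGet2, pvAddAt, pvGetD_modify]
  by_cases hri : r = i
  · subst hri
    rw [if_pos ⟨rfl, by omega⟩, pvGetD_modify]
    by_cases hcj : c = j
    · subst hcj
      rw [if_pos ⟨rfl, by rw [h2 r (by omega)]; omega⟩, if_pos ⟨rfl, rfl⟩]
    · rw [if_neg (by tauto), if_neg (by tauto)]; simp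
  · rw [if_neg (by tauto), if_neg (by tauto)]; simp

def pvSkOK (s : List Int) (n m : Nat) : Prop :=
  pvR1 s ≤ pvR2 s ∧ pvR2 s < n ∧ pvC1 s ≤ pvC2 s ∧ pvC2 s < m

def pvBodyA (g : List (List Int)) (s : List Int) : List (List Int) :=
    let d := s.getD 5 0
    let g := pvAddAt g (s.getD 1 0).toNat (s.getD 2 0).toNat (if s.getD 0 0 = 1 then -d else d)
    let g := pvAddAt g (s.getD 1 0).toNat ((s.getD 4 0).toNat + 1) (if s.getD 0 0 = 1 then d else -d)
    let g := pvAddAt g ((s.getD 3 0).toNat + 1) ((s.getD 4 0).toNat + 1) (if s.getD 0 0 = 1 then -d else d)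
    pvAddAt g ((s.getD 3 0).toNat + 1) (s.getD 2 0).toNat (if s.getD 0 0 = 1 then d else -d)

theorem pvShape_bodyA {g : List (List Int)} {n m : Nat} (h : pvShape g (n+1) (m+1)) (s : List Int) :
    pvShape (pvBodyA g s) (n+1) (m+1) :=
  pvShape_addAt (pvShape_addAt (pvShape_addAt (pvShape_addAt h _ _ _) _ _ _) _ _ _) _ _ _

theorem pvGet2_bodyA {g : List (List Int)} {n m : Nat} (h : pvShape g (n+1) (m+1))
    (s : List Int) (hs : pvSkOK s n m) (i j : Nat) :
    pvGet2 (pvBodyA g s) i j = pvGet2 g i j + pvDelta s * pvRmask s i * pvCmask s j := by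
  obtain ⟨hb1, hb2, hb3, hb4⟩ := hs
  have e1 : (if s.getD 0 0 = 1 then -(s.getD 5 0) else s.getD 5 0) = pvDelta s := rfl
  have e2 : (if s.getD 0 0 = 1 then s.getD 5 0 else -(s.getD 5 0)) = -pvDelta s := by
    rw [pvDelta]; split_ifs <;> ring
  have h1 := pvShape_addAt h (pvR1 s) (pvC1 s) (pvDelta s)
  have h2 := pvShape_addAt h1 (pvR1 s) (pvC2 s + 1) (-pvDelta s)
  have h3 := pvShape_addAt h2 (pvR2 s + 1) (pvC2 s + 1) (pvDelta s)
  rw [pvBodyA]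
  show pvGet2 (pvAddAt (pvAddAt (pvAddAt (pvAddAt g _ _ _) _ _ _) _ _ _) _ _ _) i j = _
  rw [e1, e2]
  rw [show (s.getD 1 0).toNat = pvR1 s from rfl, show (s.getD 2 0).toNat = pvC1 s from rfl,
      show (s.getD 3 0).toNat = pvR2 s from rfl, show (s.getD 4 0).toNat = pvC2 s from rfl]
  rw [pvGet2_addAt h3 _ _ (by omega) (by omega),
      pvGet2_addAt h2 _ _ (by omega) (by omega),
      pvGet2_addAt h1 _ _ (by omega) (by omega),
      pvGet2_addAt h _ _ (by omega) (by omega)]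
  rw [pvRmask, pvCmask]
  split_ifs <;> first | (exfalso; omega) | ring

theorem pvSk1_get2 (skill : List (List Int)) (n m : Nat)
    (hsk : ∀ s ∈ skill, pvSkOK s n m) :
    ∀ g, pvShape g (n+1) (m+1) →
    pvShape (skill.foldl pvBodyA g) (n+1) (m+1) ∧
    ∀ i j, pvGet2 (skill.foldl pvBodyA g) i j = pvGet2 g i j +
      (skill.map (fun s => pvDelta s * pvRmask s i * pvCmask s j)).sum := by
  induction skill with
  | nil => intro g hg; exact ⟨hg, by simp⟩
  | cons s l ih =>
    intro g hg
    have hs := hsk s (by simp)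
    have hg' := pvShape_bodyA hg s
    obtain ⟨ha, hb⟩ := ih (fun t ht => hsk t (by simp [ht])) (pvBodyA g s) hg'
    refine ⟨ha, fun i j => ?_⟩
    rw [List.foldl_cons] at *
    rw [hb i j, pvGet2_bodyA hg s hs]
    simp [add_assoc]

theorem pvModify_modify {α : Type} (l : List α) (i : Nat) (f h : α → α) :
    (l.modify i f).modify i h = l.modify i (fun x => h (f x)) := by
  apply List.ext_getElem?
  intro j
  by_cases hij : i = j <;> cases hj : l[j]? <;> simp [hij, hj]

-- factor a loop that only modifies row r into a single modify of row r
theorem pvFoldl_modify_same {α : Type} (L : List α) (r : Nat) (F : α → List Int → List Int)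
    (g : List (List Int)) :
    L.foldl (fun g c => g.modify r (F c)) g
      = g.modify r (fun row => L.foldl (fun row c => F c row) row) := by
  induction L generalizing g with
  | nil => exact (List.modify_id r g).symm
  | cons c L ih =>
    simp only [List.foldl_cons]
    rw [ih, pvModify_modify]

theorem pvLen_modify {α : Type} (l : List α) (i : Nat) (f : α → α) :
    (l.modify i f).length = l.length := List.length_modify f l i

def pvRowPass (m : Nat) (row : List Int) : List Int :=
  (List.range m).foldl (fun row c => row.modify (c+1) (fun x => x + row.getD c 0)) row

-- partial row-prefix invariant
theorem pvRowPass_aux (row : List Int) (m : Nat) (h : row.length = m + 1) :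
    ∀ k ≤ m,
      ((List.range k).foldl (fun row c => row.modify (c+1) (fun x => x + row.getD c 0)) row).length = m + 1 ∧
      ∀ j, ((List.range k).foldl (fun row c => row.modify (c+1) (fun x => x + row.getD c 0)) row).getD j 0
        = if j ≤ k then ((List.range (j+1)).map (fun c => row.getD c 0)).sum else row.getD j 0 := by
  intro k
  induction k with
  | zero =>
    intro _
    refine ⟨by simpa using h, fun j => ?_⟩
    simp only [List.range_zero, List.foldl_nil]
    by_cases hj : j ≤ 0
    · have : j = 0 := by omega
      subst this
      simp
    · rw [if_neg hj]
  | succ k ih =>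
    intro hk
    obtain ⟨hl, hv⟩ := ih (by omega)
    rw [List.range_succ, List.foldl_append, List.foldl_cons, List.foldl_nil]
    constructor
    · rw [pvLen_modify]; exact hl
    intro j
    rw [pvGetD_modify]
    by_cases hj : j = k + 1
    · subst hj
      rw [if_pos ⟨rfl, by omega⟩, hv (k+1), hv k, if_neg (by omega), if_pos (le_refl k),
          if_pos (by omega)]
      rw [List.range_succ (n := k+1), List.map_append, List.sum_append]
      simp [add_comm]
    · rw [if_neg (by tauto), hv j]
      by_cases h2 : j ≤ k
      · rw [if_pos h2, if_pos (by omega)]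
      · rw [if_neg h2, if_neg (by omega)]

-- applying a per-row function to rows 0..n'-1
theorem pvFoldl_modify_rows (n' : Nat) (f : List Int → List Int) (g : List (List Int)) :
    ((List.range n').foldl (fun g r => g.modify r f) g).length = g.length ∧
    ∀ i, ((List.range n').foldl (fun g r => g.modify r f) g).getD i []
      = if i < n' ∧ i < g.length then f (g.getD i []) else g.getD i [] := by
  induction n' with
  | zero => exact ⟨rfl, fun i => by simp⟩
  | succ k ih =>
    obtain ⟨hl, hv⟩ := ih
    rw [List.range_succ, List.foldl_append, List.foldl_cons, List.foldl_nil]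
    refine ⟨by rw [pvLen_modify, hl], fun i => ?_⟩
    rw [pvGetD_modify, hv i]
    by_cases hik : k = i
    · subst hik
      by_cases hkg : k < g.length
      · rw [if_pos ⟨rfl, by rw [hl]; omega⟩, if_neg (by omega), if_pos ⟨by omega, hkg⟩]
      · rw [if_neg (by rw [hl]; omega), if_neg (by omega), if_neg (by omega)]
    · by_cases h2 : i < k ∧ i < g.length
      · rw [if_neg (by tauto), if_pos h2, if_pos ⟨by omega, h2.2⟩]
      · rw [if_neg (by tauto), if_neg h2, if_neg (by omega)]

-- one column's prefix pass (inner fold of A's second pass), partial invariant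
theorem pvColPass_aux (g : List (List Int)) (n m c : Nat) (hg : pvShape g (n+1) (m+1))
    (hc : c ≤ m) :
    ∀ k ≤ n,
      pvShape ((List.range k).foldl (fun g r =>
        g.modify (r+1) (fun row => row.modify c (fun x => x + (g.getD r []).getD c 0))) g) (n+1) (m+1) ∧
      ∀ i j, pvGet2 ((List.range k).foldl (fun g r =>
        g.modify (r+1) (fun row => row.modify c (fun x => x + (g.getD r []).getD c 0))) g) i j
        = if j = c ∧ i ≤ k then ((List.range (i+1)).map (fun r' => pvGet2 g r' c)).sum
          else pvGet2 g i j := by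
  intro k
  induction k with
  | zero =>
    intro _
    refine ⟨hg, fun i j => ?_⟩
    simp only [List.range_zero, List.foldl_nil]
    by_cases hj : j = c ∧ i ≤ 0
    · obtain ⟨rfl, hi⟩ := hj
      have : i = 0 := by omega
      subst this
      simp [pvGet2]
    · rw [if_neg hj]
  | succ k ih =>
    intro hk
    obtain ⟨hs, hv⟩ := ih (by omega)
    rw [List.range_succ, List.foldl_append, List.foldl_cons, List.foldl_nil]
    set G := (List.range k).foldl (fun g r =>
        g.modify (r+1) (fun row => row.modify c (fun x => x + (g.getD r []).getD c 0))) g with hG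
    have hadd : ∀ i j, pvGet2 (pvAddAt G (k+1) c ((G.getD k []).getD c 0)) i j
        = pvGet2 G i j + if k+1 = i ∧ c = j then (G.getD k []).getD c 0 else 0 :=
      pvGet2_addAt hs (k+1) c (by omega) (by omega) _
    refine ⟨pvShape_addAt hs (k+1) c _, fun i j => ?_⟩
    rw [show G.modify (k+1) (fun row => row.modify c fun x => x + (G.getD k []).getD c 0)
          = pvAddAt G (k+1) c ((G.getD k []).getD c 0) from rfl, hadd i j]
    have hGk : (G.getD k []).getD c 0 = ((List.range (k+1)).map (fun r' => pvGet2 g r' c)).sum := by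
      have := hv k c
      rw [if_pos ⟨rfl, le_refl k⟩] at this
      exact this
    by_cases hij : k + 1 = i ∧ c = j
    · obtain ⟨hi, rfl⟩ := hij
      subst hi
      rw [hv _ _, if_neg (by omega), if_pos ⟨rfl, by omega⟩, hGk]
      rw [List.range_succ (n := k+1), List.map_append, List.sum_append]
      simp [add_comm]
    · rw [hv i j, if_neg hij]
      by_cases h2 : j = c ∧ i ≤ k
      · rw [if_pos h2, if_pos ⟨h2.1, by omega⟩, add_zero]
      · rw [if_neg h2, if_neg (by omega), add_zero]

-- the whole column pass: after processing columns 0..t-1, those columns hold vertical prefix sums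
theorem pvColsPass (g : List (List Int)) (n m : Nat) (hg : pvShape g (n+1) (m+1)) :
    ∀ t ≤ m,
    pvShape ((List.range t).foldl (fun g c => (List.range n).foldl (fun g r =>
        g.modify (r+1) (fun row => row.modify c (fun x => x + (g.getD r []).getD c 0))) g) g) (n+1) (m+1) ∧
    ∀ i ≤ n, ∀ j, pvGet2 ((List.range t).foldl (fun g c => (List.range n).foldl (fun g r =>
        g.modify (r+1) (fun row => row.modify c (fun x => x + (g.getD r []).getD c 0))) g) g) i j
      = if j < t then ((List.range (i+1)).map (fun r' => pvGet2 g r' j)).sum else pvGet2 g i j := by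
  intro t
  induction t with
  | zero => exact fun _ => ⟨hg, fun i _ j => by simp⟩
  | succ t ih =>
    intro ht
    obtain ⟨hs, hv⟩ := ih (by omega)
    rw [List.range_succ, List.foldl_append, List.foldl_cons, List.foldl_nil]
    obtain ⟨hs', hv'⟩ := pvColPass_aux _ n m t hs (by omega : t ≤ m) n (le_refl n)
    refine ⟨hs', fun i hi j => ?_⟩
    rw [hv' i j]
    by_cases hjt : j = t
    · subst hjt
      rw [if_pos ⟨rfl, hi⟩, if_pos (by omega)]
      congr 1
      apply List.map_congr_left
      intro r' hr'
      have hr'n : r' ≤ n := by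
        have := List.mem_range.mp hr'
        omega
      rw [hv r' hr'n j, if_neg (by omega)]
    · rw [if_neg (by tauto), hv i hi j]
      by_cases h2 : j < t
      · rw [if_pos h2, if_pos (by omega)]
      · rw [if_neg h2, if_neg (by omega)]

-- B inner loop: add δ at every column index in [c1, c2) of a row
theorem pvRowAdd (δ : Int) : ∀ (k : Nat) (c1 c2 : Int), 0 ≤ c1 → (c2 - c1).toNat = k →
    ∀ row : List Int,
    ((PySem.List.pyRange c1 c2 1).foldl (fun row c => row.modify c.toNat (fun x => x + δ)) row).length = row.length ∧
    ∀ j : Nat, ((PySem.List.pyRange c1 c2 1).foldl (fun row c => row.modify c.toNat (fun x => x + δ)) row).getD j 0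
      = row.getD j 0 + if c1 ≤ (j:Int) ∧ (j:Int) < c2 ∧ j < row.length then δ else 0 := by
  intro k
  induction k with
  | zero =>
    intro c1 c2 h1 hk row
    rw [PySem.List.pyRange_one_eq_nil (by omega)]
    exact ⟨rfl, fun j => by rw [if_neg (by omega), List.foldl_nil, add_zero]⟩
  | succ k ih =>
    intro c1 c2 h1 hk row
    rw [PySem.List.pyRange_one_cons (by omega), List.foldl_cons]
    obtain ⟨hl, hv⟩ := ih (c1+1) c2 (by omega) (by omega) (row.modify c1.toNat (fun x => x + δ))
    rw [pvLen_modify] at hl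
    refine ⟨hl, fun j => ?_⟩
    rw [hv j, pvGetD_modify, pvLen_modify]
    by_cases hj : c1.toNat = j ∧ j < row.length
    · rw [if_pos hj, if_neg (by omega), if_pos ⟨by omega, by omega, hj.2⟩]
      ring
    · rw [if_neg hj]
      by_cases h2 : c1 + 1 ≤ (j:Int) ∧ (j:Int) < c2 ∧ j < row.length
      · rw [if_pos h2, if_pos (by omega)]
      · rw [if_neg h2, if_neg (by omega)]

-- B outer loop: apply F to every row index in [a, b)
theorem pvRowsFold (F : List Int → List Int) : ∀ (k : Nat) (a b : Int), 0 ≤ a → (b - a).toNat = k →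
    ∀ g : List (List Int),
    ((PySem.List.pyRange a b 1).foldl (fun g r => g.modify r.toNat F) g).length = g.length ∧
    ∀ i : Nat, ((PySem.List.pyRange a b 1).foldl (fun g r => g.modify r.toNat F) g).getD i []
      = if a ≤ (i:Int) ∧ (i:Int) < b ∧ i < g.length then F (g.getD i []) else g.getD i [] := by
  intro k
  induction k with
  | zero =>
    intro a b h1 hk g
    rw [PySem.List.pyRange_one_eq_nil (by omega)]
    exact ⟨rfl, fun i => by rw [if_neg (by omega), List.foldl_nil]⟩
  | succ k ih =>
    intro a b h1 hk g
    rw [PySem.List.pyRange_one_cons (by omega), List.foldl_cons]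
    obtain ⟨hl, hv⟩ := ih (a+1) b (by omega) (by omega) (g.modify a.toNat F)
    rw [pvLen_modify] at hl
    refine ⟨hl, fun i => ?_⟩
    rw [hv i, pvGetD_modify, pvLen_modify]
    by_cases hi : a.toNat = i ∧ i < g.length
    · rw [if_neg (by omega), if_pos hi, if_pos ⟨by omega, by omega, hi.2⟩]
    · rw [if_neg hi]
      by_cases h2 : a + 1 ≤ (i:Int) ∧ (i:Int) < b ∧ i < g.length
      · rw [if_pos h2, if_pos (by omega)]
      · rw [if_neg h2, if_neg (by omega)]

def pvSkPre (s : List Int) (n m : Nat) : Prop :=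
  0 ≤ s.getD 1 0 ∧ s.getD 1 0 ≤ s.getD 3 0 ∧ s.getD 3 0 < (n:Int) ∧
  0 ≤ s.getD 2 0 ∧ s.getD 2 0 ≤ s.getD 4 0 ∧ s.getD 4 0 < (m:Int)

def pvBodyB (b : List (List Int)) (s : List Int) : List (List Int) :=
  (PySem.List.pyRange (s.getD 1 0) (s.getD 3 0 + 1) 1).foldl (fun b r =>
    (PySem.List.pyRange (s.getD 2 0) (s.getD 4 0 + 1) 1).foldl (fun b c =>
      b.modify r.toNat (fun row => row.modify c.toNat
        (fun x => x + (if s.getD 0 0 = 1 then -(s.getD 5 0) else s.getD 5 0)))) b) b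

theorem pvGet2_bodyB {b : List (List Int)} {n m : Nat} (hb : pvShapeGe b n m)
    {s : List Int} (hs : pvSkPre s n m) :
    pvShapeGe (pvBodyB b s) n m ∧
    ∀ i j, pvGet2 (pvBodyB b s) i j = pvGet2 b i j +
      if pvR1 s ≤ i ∧ i ≤ pvR2 s ∧ pvC1 s ≤ j ∧ j ≤ pvC2 s then pvDelta s else 0 := by
  obtain ⟨hbl, hbr⟩ := hb
  obtain ⟨p1, p2, p3, p4, p5, p6⟩ := hs
  have hfun : (fun (b : List (List Int)) (r : Int) =>
      (PySem.List.pyRange (s.getD 2 0) (s.getD 4 0 + 1) 1).foldl (fun b c =>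
        b.modify r.toNat (fun row => row.modify c.toNat (fun x => x + pvDelta s))) b)
      = fun b r => b.modify r.toNat (fun row =>
        (PySem.List.pyRange (s.getD 2 0) (s.getD 4 0 + 1) 1).foldl (fun row c =>
          row.modify c.toNat (fun x => x + pvDelta s)) row) :=
    funext fun b => funext fun r => pvFoldl_modify_same _ _ _ _
  have hbody : pvBodyB b s = (PySem.List.pyRange (s.getD 1 0) (s.getD 3 0 + 1) 1).foldl
      (fun b r => b.modify r.toNat (fun row =>
        (PySem.List.pyRange (s.getD 2 0) (s.getD 4 0 + 1) 1).foldl (fun row c =>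
          row.modify c.toNat (fun x => x + pvDelta s)) row)) b := by
    rw [pvBodyB, ← hfun, pvDelta]
  obtain ⟨hL, hV⟩ := pvRowsFold (fun row =>
      (PySem.List.pyRange (s.getD 2 0) (s.getD 4 0 + 1) 1).foldl (fun row c =>
        row.modify c.toNat (fun x => x + pvDelta s)) row)
    ((s.getD 3 0 + 1) - (s.getD 1 0)).toNat (s.getD 1 0) (s.getD 3 0 + 1) p1 rfl b
  rw [← hbody] at hL hV
  have hrowlem := fun (row : List Int) => pvRowAdd (pvDelta s)
    ((s.getD 4 0 + 1) - (s.getD 2 0)).toNat (s.getD 2 0) (s.getD 4 0 + 1) p4 rfl row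
  constructor
  · refine ⟨by rw [hL, hbl], fun i hi => ?_⟩
    rw [hV i]
    split_ifs with h
    · rw [(hrowlem _).1]; exact hbr i hi
    · exact hbr i hi

  · intro i j
    rw [pvGet2, pvGet2, hV i]
    by_cases hrow : s.getD 1 0 ≤ (i:Int) ∧ (i:Int) < s.getD 3 0 + 1 ∧ i < b.length
    · rw [if_pos hrow, (hrowlem _).2 j]
      have hrl : m ≤ (b.getD i []).length := hbr i (by omega)
      by_cases hcol : s.getD 2 0 ≤ (j:Int) ∧ (j:Int) < s.getD 4 0 + 1 ∧ j < (b.getD i []).length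
      · rw [if_pos hcol, if_pos (by unfold pvR1 pvR2 pvC1 pvC2; omega)]
      · rw [if_neg hcol, if_neg (by unfold pvR1 pvR2 pvC1 pvC2; omega), add_zero]
    · rw [if_neg hrow, if_neg (by unfold pvR1 pvR2 pvC1 pvC2; omega), add_zero]

theorem pvAltFold (skill : List (List Int)) (n m : Nat)
    (hsk : ∀ s ∈ skill, pvSkPre s n m) :
    ∀ b, pvShapeGe b n m →
    pvShapeGe (skill.foldl pvBodyB b) n m ∧
    ∀ i j, pvGet2 (skill.foldl pvBodyB b) i j = pvGet2 b i j +
      (skill.map (fun s => if pvR1 s ≤ i ∧ i ≤ pvR2 s ∧ pvC1 s ≤ j ∧ j ≤ pvC2 s then pvDelta s else 0)).sum := by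
  induction skill with
  | nil => intro b hb; exact ⟨hb, by simp⟩
  | cons s l ih =>
    intro b hb
    obtain ⟨hshape, hval⟩ := pvGet2_bodyB hb (hsk s (by simp))
    obtain ⟨ha, hv⟩ := ih (fun t ht => hsk t (by simp [ht])) (pvBodyB b s) hshape
    refine ⟨ha, fun i j => ?_⟩
    rw [List.foldl_cons, hv i j, hval i j]
    simp [add_assoc]

theorem pvSum_map_neg (l : List Nat) (f : Nat → Int) : (l.map fun b => -f b).sum = -(l.map f).sum := by
  induction l with
  | nil => simp
  | cons a t ih => simp [ih]; ring

theorem pvCast_sum (l : List Nat) : ((l.sum : Nat) : Int) = (l.map (Nat.cast : Nat → Int)).sum := by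
  induction l with
  | nil => simp
  | cons a t ih => rw [List.sum_cons, Nat.cast_add, ih, List.map_cons, List.sum_cons]

theorem sum_indicator_range (k : Nat) (t : Nat) (v : Int) :
    ((List.range k).map (fun x => if t = x then v else 0)).sum = if t < k then v else 0 := by
  induction k with
  | zero => simp
  | succ k ih =>
    rw [List.range_succ]
    simp [ih]
    by_cases h1 : t = k
    · simp [h1]
    · by_cases h2 : t < k <;> simp [h1, h2] <;> omega

-- sum over the first k cells of a ±1 difference mask
theorem pvMaskSum (a b k : Nat) :
    ((List.range k).map (fun x => (if a = x then (1:Int) else 0) - (if b + 1 = x then 1 else 0))).sum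
      = (if a < k then (1:Int) else 0) - (if b + 1 < k then 1 else 0) := by
  have h : (fun x => (if a = x then (1:Int) else 0) - (if b + 1 = x then 1 else 0))
      = fun x => (if a = x then (1:Int) else 0) + (-(if b + 1 = x then (1:Int) else 0)) := by
    funext x; ring
  rw [h, PySem.List.sum_map_add_int, pvSum_map_neg, sum_indicator_range, sum_indicator_range]
  ring

-- double prefix sum of one skill's four corner masses = its rectangle indicator
theorem pvPrefixMask (s : List Int) (n m : Nat) (hs : pvSkOK s n m) (i j : Nat) :
    ((List.range (i+1)).map (fun r' =>
      ((List.range (j+1)).map (fun c' => pvDelta s * pvRmask s r' * pvCmask s c')).sum)).sum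
    = if pvR1 s ≤ i ∧ i ≤ pvR2 s ∧ pvC1 s ≤ j ∧ j ≤ pvC2 s then pvDelta s else 0 := by
  obtain ⟨h1, h2, h3, h4⟩ := hs
  simp only [pvRmask, pvCmask]
  have hinner : ∀ r', ((List.range (j+1)).map (fun c' => pvDelta s *
        ((if pvR1 s = r' then (1:Int) else 0) - (if pvR2 s + 1 = r' then 1 else 0)) *
        ((if pvC1 s = c' then (1:Int) else 0) - (if pvC2 s + 1 = c' then 1 else 0)))).sum
      = (pvDelta s * ((if pvC1 s < j+1 then (1:Int) else 0) - (if pvC2 s + 1 < j+1 then 1 else 0))) *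
        ((if pvR1 s = r' then (1:Int) else 0) - (if pvR2 s + 1 = r' then 1 else 0)) := by
    intro r'
    rw [List.sum_map_mul_left, pvMaskSum]
    ring
  rw [List.map_congr_left (fun r' _ => hinner r'), List.sum_map_mul_left, pvMaskSum]
  split_ifs <;> first | (exfalso; omega) | ring

theorem list_sum_comm {α β : Type} (l1 : List α) (l2 : List β) (f : α → β → Int) :
    (l1.map fun a => (l2.map (f a)).sum).sum = (l2.map fun b => (l1.map fun a => f a b).sum).sum := by
  induction l1 with
  | nil => simp
  | cons a l ih => simp [ih]

-- A's counting loop as a double 0/1 sum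
theorem pvCountA (n m : Nat) (val : Nat → Nat → Int) :
    (List.range n).foldl (fun acc i => (List.range m).foldl
        (fun acc j => if val i j > 0 then acc + 1 else acc) acc) (0:Int)
    = ((List.range n).map (fun i => ((List.range m).map
        (fun j => if val i j > 0 then (1:Int) else 0)).sum)).sum := by
  have h1 : ∀ (i : Nat) (acc : Int), (List.range m).foldl
      (fun acc j => if val i j > 0 then acc + 1 else acc) acc
      = acc + ((List.range m).map (fun j => if val i j > 0 then (1:Int) else 0)).sum := by
    intro i acc
    rw [show (fun (acc : Int) (j : Nat) => if val i j > 0 then acc + 1 else acc)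
        = fun acc j => acc + (if val i j > 0 then (1:Int) else 0) from
      funext fun acc => funext fun j => by split_ifs <;> ring]
    exact PySem.List.foldl_add _ _ _
  rw [show (fun (acc : Int) (i : Nat) => (List.range m).foldl
        (fun acc j => if val i j > 0 then acc + 1 else acc) acc)
      = fun acc i => acc + ((List.range m).map (fun j => if val i j > 0 then (1:Int) else 0)).sum from
    funext fun acc => funext fun i => h1 i acc]
  rw [PySem.List.foldl_add, zero_add]

-- B's count as a double 0/1 sum over the declared rows × cols grid
theorem pvCountB (b : List (List Int)) (n m : Nat) :
    ((((List.range n).flatMap (fun r => (List.range m).map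
        (fun c => (b.getD r []).getD c 0))).countP (fun v => decide (0 < v)) : Nat) : Int)
    = ((List.range n).map (fun i => ((List.range m).map
        (fun j => if pvGet2 b i j > 0 then (1:Int) else 0)).sum)).sum := by
  rw [List.flatMap_def, List.countP_flatten, List.map_map, pvCast_sum, List.map_map]
  apply congrArg
  apply List.map_congr_left
  intro i _
  simp only [Function.comp_apply, List.countP_map]
  rw [(PySem.List.sum_map_ite_one_zero ((fun v => decide ((0:Int) < v)) ∘
      (fun c => (b.getD i []).getD c 0)) (List.range m)).symm]
  apply congrArg
  apply List.map_congr_left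
  intro j _
  rw [pvGet2]
  by_cases h : 0 < (b.getD i []).getD j 0 <;> simp [h]

theorem pvGetD_replicate {α : Type} (i n : Nat) (a d : α) :
    (List.replicate n a).getD i d = if i < n then a else d := by
  rw [List.getD_eq_getElem?_getD, List.getElem?_replicate]
  split_ifs <;> simp

theorem pvShape_zero (n m : Nat) :
    pvShape (List.replicate (n+1) (List.replicate (m+1) (0:Int))) (n+1) (m+1) :=
  ⟨by simp, fun i hi => by rw [pvGetD_replicate, if_pos hi, List.length_replicate]⟩

theorem pvGet2_zero (n m i j : Nat) :
    pvGet2 (List.replicate (n+1) (List.replicate (m+1) (0:Int))) i j = 0 := by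
  rw [pvGet2, pvGetD_replicate]
  split_ifs
  · rw [pvGetD_replicate]; split_ifs <;> rfl
  · rfl

-- ===== VERDICT (by name: the statement is the Claim_ definition above) =====
theorem solution_spec : Claim_equal_solution := by
  unfold Claim_equal_solution
  intro board skill _ hpre
  obtain ⟨hne, hrect, hskills⟩ := hpre
  unfold Spec_solution
  set n := board.length with hn
  set m := (board.getD 0 []).length with hm
  have hshapeB : pvShapeGe board n m := by
    refine ⟨rfl, fun i hi => ?_⟩
    rw [List.getD_eq_getElem _ _ hi]
    exact hrect _ (List.getElem_mem hi)
  have hskPre : ∀ s ∈ skill, pvSkPre s n m := by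
    intro s hs
    have h := hskills s hs
    exact ⟨h.2.1, h.2.2.1, h.2.2.2.1, h.2.2.2.2.1, h.2.2.2.2.2.1, h.2.2.2.2.2.2⟩
  have hskOK : ∀ s ∈ skill, pvSkOK s n m := by
    intro s hs
    have h := hskills s hs
    unfold pvSkOK pvR1 pvR2 pvC1 pvC2
    omega
  -- B side
  obtain ⟨hBshape, hBval⟩ := pvAltFold skill n m hskPre board hshapeB
  have hBdef : solution_alt board skill
      = (((((List.range n).flatMap (fun r => (List.range m).map
          (fun c => ((skill.foldl pvBodyB board).getD r []).getD c 0))).countP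
          (fun v => decide (0 < v)) : Nat) : Int)) := rfl
  rw [hBdef, pvCountB _ n m]
  -- A side: canonical staged form (definitional)
  have hAdef : solution board skill =
      (List.range n).foldl (fun acc i => (List.range m).foldl (fun acc j =>
        if (board.getD i []).getD j 0 + ((
          (List.range m).foldl (fun g c => (List.range n).foldl (fun g r =>
            g.modify (r+1) (fun row => row.modify c (fun x => x + (g.getD r []).getD c 0))) g)
          ((List.range n).foldl (fun g r => (List.range m).foldl (fun g c =>
            g.modify r (fun row => row.modify (c+1) (fun x => x + row.getD c 0))) g)
           (skill.foldl pvBodyA (List.replicate (n+1) (List.replicate (m+1) 0))))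
        ).getD i []).getD j 0 > 0 then acc + 1 else acc) acc) 0 := rfl
  rw [hAdef]
  rw [show (fun (g : List (List Int)) (r : Nat) => (List.range m).foldl (fun g c =>
        g.modify r (fun row => row.modify (c+1) (fun x => x + row.getD c 0))) g)
      = fun g r => g.modify r (pvRowPass m) from
    funext fun g => funext fun r =>
      pvFoldl_modify_same (List.range m) r (fun c row => row.modify (c+1) (fun x => x + row.getD c 0)) g]
  rw [pvCountA]
  -- characterize the three stages
  obtain ⟨h1s, h1v⟩ := pvSk1_get2 skill n m hskOK _ (pvShape_zero n m)
  obtain ⟨h2len, h2get⟩ := pvFoldl_modify_rows n (pvRowPass m)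
    (skill.foldl pvBodyA (List.replicate (n+1) (List.replicate (m+1) 0)))
  have h2shape : pvShape ((List.range n).foldl (fun g r => g.modify r (pvRowPass m))
      (skill.foldl pvBodyA (List.replicate (n+1) (List.replicate (m+1) 0)))) (n+1) (m+1) := by
    refine ⟨by rw [h2len, h1s.1], fun i hi => ?_⟩
    rw [h2get i]
    split_ifs with h
    · exact ((pvRowPass_aux _ m (h1s.2 i (by omega)) m (le_refl m)).1 :
        (pvRowPass m _).length = m + 1)
    · exact h1s.2 i hi
  have h2val : ∀ r' < n, ∀ j ≤ m, pvGet2 ((List.range n).foldl (fun g r => g.modify r (pvRowPass m))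
        (skill.foldl pvBodyA (List.replicate (n+1) (List.replicate (m+1) 0)))) r' j
      = ((List.range (j+1)).map (fun c' => pvGet2
          (skill.foldl pvBodyA (List.replicate (n+1) (List.replicate (m+1) 0))) r' c')).sum := by
    intro r' hr' j hj
    rw [pvGet2, h2get r', if_pos ⟨hr', by rw [h1s.1]; omega⟩]
    have haux : (pvRowPass m ((skill.foldl pvBodyA
          (List.replicate (n+1) (List.replicate (m+1) 0))).getD r' [])).getD j 0
        = if j ≤ m then ((List.range (j+1)).map (fun c => ((skill.foldl pvBodyA
            (List.replicate (n+1) (List.replicate (m+1) 0))).getD r' []).getD c 0)).sum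
          else ((skill.foldl pvBodyA
            (List.replicate (n+1) (List.replicate (m+1) 0))).getD r' []).getD j 0 :=
      (pvRowPass_aux _ m (h1s.2 r' (by omega)) m (le_refl m)).2 j
    rw [haux, if_pos hj]
    rfl
  obtain ⟨h3s, h3v⟩ := pvColsPass _ n m h2shape m (le_refl m)
  -- pointwise equality of the two double sums
  congr 1
  apply List.map_congr_left
  intro i hi
  have hi' : i < n := List.mem_range.mp hi
  congr 1
  apply List.map_congr_left
  intro j hj
  have hj' : j < m := List.mem_range.mp hj
  have hval : (board.getD i []).getD j 0 + (((List.range m).foldl (fun g c =>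
        (List.range n).foldl (fun g r =>
          g.modify (r+1) (fun row => row.modify c (fun x => x + (g.getD r []).getD c 0))) g)
      ((List.range n).foldl (fun g r => g.modify r (pvRowPass m))
        (skill.foldl pvBodyA (List.replicate (n+1) (List.replicate (m+1) 0))))).getD i []).getD j 0
      = pvGet2 (skill.foldl pvBodyB board) i j := by
    show (board.getD i []).getD j 0 + pvGet2 ((List.range m).foldl (fun g c =>
        (List.range n).foldl (fun g r =>
          g.modify (r+1) (fun row => row.modify c (fun x => x + (g.getD r []).getD c 0))) g)
      ((List.range n).foldl (fun g r => g.modify r (pvRowPass m))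
        (skill.foldl pvBodyA (List.replicate (n+1) (List.replicate (m+1) 0))))) i j
      = pvGet2 (skill.foldl pvBodyB board) i j
    rw [hBval i j, h3v i (by omega) j, if_pos hj']
    have hrow : ∀ r' ∈ List.range (i+1), pvGet2 ((List.range n).foldl (fun g r => g.modify r (pvRowPass m))
          (skill.foldl pvBodyA (List.replicate (n+1) (List.replicate (m+1) 0)))) r' j
        = ((List.range (j+1)).map (fun c' =>
            (skill.map (fun s => pvDelta s * pvRmask s r' * pvCmask s c')).sum)).sum := by
      intro r' hr'
      have hr'n : r' < n := by have := List.mem_range.mp hr'; omega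
      rw [h2val r' hr'n j (by omega)]
      apply congrArg
      apply List.map_congr_left
      intro c' _
      rw [h1v r' c', pvGet2_zero, zero_add]
    rw [List.map_congr_left hrow]
    have hswap1 : ∀ r', ((List.range (j+1)).map (fun c' =>
          (skill.map (fun s => pvDelta s * pvRmask s r' * pvCmask s c')).sum)).sum
        = (skill.map (fun s => ((List.range (j+1)).map
            (fun c' => pvDelta s * pvRmask s r' * pvCmask s c')).sum)).sum := by
      intro r'
      exact list_sum_comm (List.range (j+1)) skill (fun c' s => pvDelta s * pvRmask s r' * pvCmask s c')
    rw [List.map_congr_left (fun r' _ => hswap1 r')]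
    rw [list_sum_comm (List.range (i+1)) skill (fun r' s => ((List.range (j+1)).map
        (fun c' => pvDelta s * pvRmask s r' * pvCmask s c')).sum)]
    rw [show (skill.map (fun s => ((List.range (i+1)).map (fun r' => ((List.range (j+1)).map
          (fun c' => pvDelta s * pvRmask s r' * pvCmask s c')).sum)).sum))
        = skill.map (fun s => if pvR1 s ≤ i ∧ i ≤ pvR2 s ∧ pvC1 s ≤ j ∧ j ≤ pvC2 s then pvDelta s else 0) from
      List.map_congr_left (fun s hs => pvPrefixMask s n m (hskOK s hs) i j)]
    rw [pvGet2]
  rw [hval]
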